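-- pv_equiv track=rewrite | github.com/Alphexus/lossless-string-compression | compression.py | getAllRepeateds
-- ===== SOURCE A (Python) =====
-- def findRepeated(string):
--   output = ""
--   for i in range(1, len(string)-1):
--     substr = string[:i]
--     if string.find(substr, i+1) != -1:
--       output = substr
--     else:
--       break
--
--   return output
--
-- def getAllRepeateds(text):
--   output = []
--   while True:
--     repeated = findRepeated(text)
--     if repeated and len(repeated) > 1:
--       output.append(repeated)
--       text = text.replace(repeated, "")
--     elif len(text) > 1:
--       text = text[1:]
--     else:
--       break
--
--   return output
-- ===== SOURCE B (Python) =====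
-- def _bestLen(text):
--     # largest i in [1, cap] with text[:i] occurring at position >= i+1, else 0.
--     # The predicate is monotone in i, so gallop then binary-search instead of a linear scan.
--     cap = len(text) - 2
--     def ok(i):
--         return text.find(text[:i], i + 1) != -1
--     if cap < 1 or not ok(1):
--         return 0
--     lo, hi = 1, 2
--     while hi <= cap and ok(hi):
--         lo, hi = hi, hi * 2
--     hi = min(hi, cap + 1)
--     while hi - lo > 1:
--         mid = (lo + hi) // 2
--         if ok(mid):
--             lo = mid
--         else:
--             hi = mid
--     return lo
--
-- def getAllRepeateds(text):
--     out = []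
--     while len(text) > 1:
--         m = _bestLen(text)
--         if m >= 2:
--             rep = text[:m]
--             out.append(rep)
--             text = text.replace(rep, "")
--         else:
--             text = text[1:]
--     return out
-- ===== Notes on version B (the rewrite author's own statement) =====
-- stated objective: alternative
-- what changed: A's findRepeated grows the repeated prefix one character at a time, calling str.find once per candidate length until the first failure; B exploits that the probed predicate is monotone in the prefix length and locates the largest feasible length by galloping plus binary search over the same str.find probe, and merges the outer while-True's three branches into a while len>1 with two branches.
import Mathlib
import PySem

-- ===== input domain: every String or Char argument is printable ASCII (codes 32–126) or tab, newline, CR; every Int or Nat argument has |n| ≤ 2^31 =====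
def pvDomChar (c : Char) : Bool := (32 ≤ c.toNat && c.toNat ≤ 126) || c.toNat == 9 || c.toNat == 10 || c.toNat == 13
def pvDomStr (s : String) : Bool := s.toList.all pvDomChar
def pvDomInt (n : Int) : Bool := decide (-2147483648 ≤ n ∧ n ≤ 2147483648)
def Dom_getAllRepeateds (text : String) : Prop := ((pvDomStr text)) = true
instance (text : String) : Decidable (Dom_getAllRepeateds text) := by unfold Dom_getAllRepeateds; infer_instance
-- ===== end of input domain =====

-- B replaces A's linear prefix-growing scan (one str.find per candidate length) by galloping +
-- binary search over the same monotone predicate: an alternative algorithm for the same value.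

-- ===== PORT A =====
-- for i in range(1, len(string)-1): substr = string[:i]; if string.find(substr, i+1) != -1: output = substr else: break
def findRepLoopA (s : List Char) (idxs : List Int) (output : List Char) : List Char :=
  match idxs with
  | [] => output
  | i :: rest =>
    let substr := PySem.List.slice s none (some i)
    if PySem.Chars.findFrom s substr (i + 1) ≠ -1 then
      findRepLoopA s rest substr
    else output

def findRepeatedA (s : List Char) : List Char :=
  findRepLoopA s (PySem.List.pyRange 1 ((s.length : Int) - 1) 1) []

-- while True: … ;  fuel = len(text)+1 iterations always suffice (each non-break step shortens text)
def getAllLoopA : Nat → List Char → List (List Char) → List (List Char)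
  | 0, _, output => output
  | fuel + 1, text, output =>
    let repeated := findRepeatedA text
    if repeated ≠ [] ∧ 1 < repeated.length then
      getAllLoopA fuel (PySem.Chars.replace text repeated []) (output ++ [repeated])
    else if 1 < text.length then
      getAllLoopA fuel (PySem.List.slice text (some 1) none) output
    else output

def getAllRepeateds (text : String) : List String :=
  (getAllLoopA (text.toList.length + 1) text.toList []).map String.ofList

-- ===== PORT B =====
-- ok(i) = text.find(text[:i], i+1) != -1
def okB (s : List Char) (i : Nat) : Bool :=
  decide (PySem.Chars.findFrom s (s.take i) ((i + 1 : Nat) : Int) ≠ -1)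

-- while hi <= cap and ok(hi): lo, hi = hi, hi*2   (0 < hi carried for termination; hi starts at 2)
def gallopB (s : List Char) (cap lo hi : Nat) (h : 0 < hi) : Nat × Nat :=
  if hc : hi ≤ cap ∧ okB s hi then gallopB s cap hi (hi * 2) (by omega) else (lo, hi)
termination_by cap + 1 - hi
decreasing_by obtain ⟨h1, -⟩ := hc; omega

-- while hi - lo > 1: mid = (lo+hi)//2; if ok(mid): lo = mid else: hi = mid
def bisectB (s : List Char) (lo hi : Nat) : Nat :=
  if h : 1 < hi - lo then
    let mid := (lo + hi) / 2
    if okB s mid then bisectB s mid hi else bisectB s lo mid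
  else lo
termination_by hi - lo
decreasing_by all_goals omega

-- _bestLen(text)
def bestLenB (s : List Char) : Nat :=
  let cap := s.length - 2
  if cap < 1 ∨ ¬ okB s 1 then 0
  else
    let lh := gallopB s cap 1 2 (by omega)
    bisectB s lh.1 (min lh.2 (cap + 1))

-- while len(text) > 1: … ;  same sufficient fuel bound as A's port
def getAllLoopB : Nat → List Char → List (List Char) → List (List Char)
  | 0, _, out => out
  | fuel + 1, text, out =>
    if 1 < text.length then
      let m := bestLenB text
      if 2 ≤ m then
        let rep := text.take m
        getAllLoopB fuel (PySem.Chars.replace text rep []) (out ++ [rep])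
      else getAllLoopB fuel (text.drop 1) out
    else out

def getAllRepeateds_alt (text : String) : List String :=
  (getAllLoopB (text.toList.length + 1) text.toList []).map String.ofList

-- ===== PRECONDITION & SPEC =====
def Spec_getAllRepeateds (text : String) (out : List String) : Prop := out = getAllRepeateds_alt text
instance (text : String) (out : List String) : Decidable (Spec_getAllRepeateds text out) := by unfold Spec_getAllRepeateds; infer_instance

-- ===== CLAIM (what is proved, stated in full; the proofs are below) =====
def Claim_equal_getAllRepeateds : Prop := ∀ (text : String), Dom_getAllRepeateds text → Spec_getAllRepeateds text (getAllRepeateds text)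

-- ===== LEMMAS AND PROOFS =====

-- the predicate both programs probe: the prefix of length i recurs at a position ≥ i+1
def condB (s : List Char) (i : Nat) : Bool := decide (s.take i <:+: s.drop (i + 1))

-- the value both computations produce: the greatest i ≤ len-2 with condB (0 if none)
def Mspec (s : List Char) : Nat := Nat.findGreatest (fun i => condB s i = true) (s.length - 2)

theorem cond_mono_step (s : List Char) (i : Nat) (h : condB s (i + 1) = true) :
    condB s i = true := by
  simp only [condB, decide_eq_true_eq] at h ⊢
  rw [← PySem.Chars.isIn_iff_infix, ← PySem.Chars.exists_prefix_drop_iff_isIn] at h ⊢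
  obtain ⟨j, hj⟩ := h
  rw [List.drop_drop] at hj
  refine ⟨1 + j, ?_⟩
  rw [List.drop_drop]
  have hpre : s.take i <+: s.take (i + 1) := by
    have := List.take_prefix i (s.take (i + 1))
    rwa [List.take_take, Nat.min_eq_left (by omega)] at this
  have : i + 1 + (1 + j) = i + 1 + 1 + j := by omega
  rw [this]
  exact hpre.trans hj

theorem cond_mono (s : List Char) : ∀ (k i : Nat), i ≤ k → condB s k = true → condB s i = true := by
  intro k
  induction k with
  | zero =>
    intro i hi h
    have : i = 0 := by omega
    rwa [this]
  | succ k ih =>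
    intro i hi h
    rcases Nat.lt_or_ge i (k + 1) with hlt | hge
    · exact ih i (by omega) (cond_mono_step s k h)
    · have : i = k + 1 := by omega
      rwa [this]

theorem Mspec_le (s : List Char) : Mspec s ≤ s.length - 2 := Nat.findGreatest_le _

theorem cond_iff (s : List Char) (i : Nat) (_h1 : 1 ≤ i) (h2 : i ≤ s.length - 2) :
    condB s i = true ↔ i ≤ Mspec s := by
  constructor
  · intro h
    exact Nat.le_findGreatest h2 h
  · intro h
    have hP0 : condB s 0 = true := by simp [condB]
    have := Nat.findGreatest_spec (P := fun i => condB s i = true)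
      (Nat.zero_le (s.length - 2)) hP0
    exact cond_mono s (Mspec s) i h this

theorem okB_iff (s : List Char) (i : Nat) (h1 : 1 ≤ i) (h2 : i ≤ s.length - 2) :
    (okB s i = true ↔ i ≤ Mspec s) := by
  rw [← cond_iff s i h1 h2]
  unfold okB condB
  simp only [decide_eq_true_eq]
  rw [not_iff_comm, PySem.Chars.findFrom_natCast_eq_neg_one_iff s (s.take i) (i + 1) (by omega)]

theorem gallopB_spec (s : List Char) : ∀ (k lo hi : Nat) (h : 0 < hi),
    k = s.length - 2 + 1 - hi → 1 ≤ lo → lo ≤ Mspec s → lo < hi →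
    1 ≤ (gallopB s (s.length - 2) lo hi h).1 ∧
    (gallopB s (s.length - 2) lo hi h).1 ≤ Mspec s ∧
    (gallopB s (s.length - 2) lo hi h).1 < (gallopB s (s.length - 2) lo hi h).2 ∧
    Mspec s < (gallopB s (s.length - 2) lo hi h).2 := by
  intro k
  induction k using Nat.strong_induction_on with
  | _ k ih =>
    intro lo hi h hk h1 hM hlh
    rw [gallopB]
    by_cases hc : hi ≤ s.length - 2 ∧ okB s hi = true
    · rw [dif_pos hc]
      have hhiM : hi ≤ Mspec s := (okB_iff s hi (by omega) hc.1).1 hc.2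
      exact ih (s.length - 2 + 1 - hi * 2) (by obtain ⟨hle, -⟩ := hc; omega)
        hi (hi * 2) (by omega) rfl (by omega) hhiM (by omega)
    · rw [dif_neg hc]
      have hM2 : Mspec s < hi := by
        rcases Nat.lt_or_ge (s.length - 2) hi with hgt | hle
        · have := Mspec_le s; omega
        · by_contra hle2
          exact hc ⟨hle, (okB_iff s hi (by omega) hle).2 (by omega)⟩
      exact ⟨h1, hM, hlh, hM2⟩

theorem bisectB_spec (s : List Char) : ∀ (k lo hi : Nat), k = hi - lo →
    1 ≤ lo → lo ≤ Mspec s → Mspec s < hi → hi ≤ s.length - 2 + 1 →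
    bisectB s lo hi = Mspec s := by
  intro k
  induction k using Nat.strong_induction_on with
  | _ k ih =>
    intro lo hi hk h1 hloM hMhi hhicap
    rw [bisectB]
    by_cases hwide : 1 < hi - lo
    · rw [dif_pos hwide]
      set mid := (lo + hi) / 2 with hmid
      have hmlo : lo < mid := by omega
      have hmhi : mid < hi := by omega
      have hmiff := okB_iff s mid (by omega) (by omega)
      by_cases hok : okB s mid
      · rw [if_pos hok]
        exact ih (hi - mid) (by omega) mid hi rfl (by omega) (hmiff.1 hok) hMhi hhicap
      · rw [if_neg hok]
        have : ¬ mid ≤ Mspec s := fun hle => hok (hmiff.2 hle)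
        exact ih (mid - lo) (by omega) lo mid rfl h1 hloM (by omega) (by omega)
    · rw [dif_neg hwide]
      omega
theorem bestLenB_eq (s : List Char) : bestLenB s = Mspec s := by
  unfold bestLenB
  simp only []
  by_cases hz : s.length - 2 < 1 ∨ ¬ okB s 1
  · rw [if_pos hz]
    have hle := Mspec_le s
    rcases hz with h | h
    · omega
    · by_contra hne
      have hM : 1 ≤ Mspec s := by omega
      exact h ((okB_iff s 1 le_rfl (by omega)).2 hM)
  · rw [if_neg hz]
    push Not at hz
    obtain ⟨hcap, hok1⟩ := hz
    have h1M : 1 ≤ Mspec s := (okB_iff s 1 le_rfl hcap).1 hok1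
    obtain ⟨hg1, hg2, hg3, hg4⟩ := gallopB_spec s (s.length - 2 + 1 - 2) 1 2 (by omega) rfl le_rfl h1M (by omega)
    apply bisectB_spec s (min (gallopB s (s.length - 2) 1 2 (by omega)).2 (s.length - 2 + 1)
        - (gallopB s (s.length - 2) 1 2 (by omega)).1) _ _ rfl hg1 hg2
    · have := Mspec_le s; omega
    · omega

theorem loopA_gen (s : List Char) : ∀ (k j : Nat), k = s.length - 1 - j → 1 ≤ j →
    j ≤ Mspec s + 1 →
    findRepLoopA s (PySem.List.pyRange (j : Int) ((s.length : Int) - 1) 1) (s.take (j - 1))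
      = s.take (Mspec s) := by
  intro k
  induction k with
  | zero =>
    intro j hk h1 hM
    have hnil : ((s.length : Int) - 1) ≤ (j : Int) := by omega
    rw [PySem.List.pyRange_one_eq_nil hnil]
    have hble := Mspec_le s
    have : j - 1 = Mspec s := by omega
    rw [this]
    rfl
  | succ k ih =>
    intro j hk h1 hM
    have hlt : (j : Int) < (s.length : Int) - 1 := by omega
    rw [PySem.List.pyRange_one_cons hlt]
    simp only [findRepLoopA]
    rw [show PySem.List.slice s none (some (j : Int)) = s.take j from
      PySem.List.slice_to_natCast s j]
    have hcast : ((j : Int) + 1) = ((j + 1 : Nat) : Int) := by push_cast; ring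
    have hj2 : j ≤ s.length - 2 := by omega
    have hiff : PySem.Chars.findFrom s (s.take j) ((j : Int) + 1) = -1 ↔
        ¬ s.take j <:+: s.drop (j + 1) := by
      rw [hcast]
      exact PySem.Chars.findFrom_natCast_eq_neg_one_iff s (s.take j) (j + 1) (by omega)
    by_cases hcond : s.take j <:+: s.drop (j + 1)
    · have hne : PySem.Chars.findFrom s (s.take j) ((j : Int) + 1) ≠ -1 := by
        intro hc; exact (hiff.1 hc) hcond
      rw [if_pos hne, hcast]
      have hjM : j ≤ Mspec s := (cond_iff s j h1 hj2).1 (by simpa [condB] using hcond)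
      have := ih (j + 1) (by omega) (by omega) (by omega)
      simpa using this
    · rw [if_neg (not_not.2 (hiff.2 hcond))]
      have hjM : ¬ j ≤ Mspec s := fun hle => hcond (by
        simpa [condB] using (cond_iff s j h1 hj2).2 hle)
      have hj1 : j - 1 = Mspec s := by omega
      rw [hj1]

theorem findRepeatedA_eq (s : List Char) : findRepeatedA s = s.take (Mspec s) := by
  unfold findRepeatedA
  have := loopA_gen s (s.length - 1 - 1) 1 rfl (le_refl 1) (by omega)
  simpa using this

theorem loops_eq : ∀ (fuel : Nat) (t : List Char) (out : List (List Char)),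
    getAllLoopA fuel t out = getAllLoopB fuel t out := by
  intro fuel
  induction fuel with
  | zero => intro t out; rfl
  | succ fuel ih =>
    intro t out
    simp only [getAllLoopA, getAllLoopB, findRepeatedA_eq, bestLenB_eq]
    have hble := Mspec_le t
    have hlen : (t.take (Mspec t)).length = Mspec t := by
      rw [List.length_take]; omega
    by_cases hM : 2 ≤ Mspec t
    · rw [if_pos ⟨by intro hc; rw [hc] at hlen; simp at hlen; omega, by omega⟩,
        if_pos (show 1 < t.length by omega), if_pos hM]
      exact ih _ _
    · rw [if_neg (by rintro ⟨-, hl⟩; omega)]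
      by_cases hl : 1 < t.length
      · rw [if_pos hl, if_pos hl, if_neg hM, PySem.List.slice_from_one, ← List.drop_one]
        exact ih _ _
      · rw [if_neg hl, if_neg hl]

-- ===== VERDICT (by name: the statement is the Claim_ definition above) =====
theorem getAllRepeateds_spec : Claim_equal_getAllRepeateds := by
  intro text _
  unfold Spec_getAllRepeateds getAllRepeateds getAllRepeateds_alt
  rw [loops_eq]
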